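/- GENERATED by farm/worked/mk_tree_copies.py from farm/worked/start_decoder.COMPOSITION/Proof.lean (a worked proof of the farm's unit `start_decoder.COMPOSITION`,
   accepted by the verdict) — do not edit. -/
import Vorbis.Spec.Units.start_decoder_COMPOSITION

/-
  THE COMPOSITION OF start_decoder: the 52 segment statements (`Seg1 … Seg9`, `SegC1 … SegC16`, `SegF1 … SegF7`, `SegR1 … SegR19`,
  `SegERR`) give the function's contract.

  HOW. Every exit assertion of a segment IS the entry assertion of a successor (the same constant `At…`), so the proof only chains
  `ReachVia.trans`, backwards from the epilogue: `sd_fromERR_w`, `sd_fromR19_w`, the estimate loop (`sd_fromR17_w`), the channel loop (`sd_fromR15_w`),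
  the mode loop (`sd_fromR13_w`), the mapping loop (`sd_fromR8_w`), the residue loop (`sd_fromR2_w`), `sd_fromR1_w`, the floor loop (`sd_fromF2_w`), `sd_fromF1_w`,
  the codebook loop (`sd_fromC2_w`), the straight part `.1 … .9, C1` (`sd_from1_w`), and `start_decoder_composes_w`.

  THE SEVEN LOOPS THAT CROSS SEGMENT BOUNDARIES have a counter `i` as an argument of the head's assertion; one lemma (`sd_countLoop_w`)
  does the induction for all of them, given an absolute bound of the counter AT THE HEAD (a bound that does not depend on the memory:
  the fields `codebook_count`, `floor_count` … are read from the state, which changes). The seven bounds are the ONLY places where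
  an assertion's body is opened (`sd_bound_C2_w … sd_bound_R17_w`): everything else treats the assertions as opaque constants.

      loop                 head        bound   from
      codebooks 3746       AtC2 i      256     `sd.done.upto` (i ≤ codebook_count), `sd.done.cb0` + `nonnull` (F1: count ≤ 256)
      floors 3966          AtF2 i      64      `i_le`, `floors.FL1`
      residues 4043        AtR2 i      64      `loop.i_le`, `loop.res.R1`
      mappings 4095        AtR8 i      64      `i_le`, `maps.MP1`
      modes 4143           AtR13 i     64      `i_le`, `modes.MD1`
      channels 4158        AtR15 i     16      `i_le`, `mid.header.HD1`
      estimate 4189        AtR17 i     64      `i_le`, `late.own.cfg.residue … R1`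
-/
namespace Vorbis.Spec.Worked.start_decoder_COMPOSITION
open Vorbis.Spec.start_decoder_COMPOSITION (Statement)
open X86 X86.User Asan Vorbis Vorbis.Spec Vorbis.Spec.StartDecoder

/-- **The 52 segment statements of start_decoder**, as one record (the hypotheses of the unit's statement). -/
structure SdSegs_w (Lay : Layout) (μ : Microarch) (u₀ : State) : Prop where
  s1 : Seg1 Lay μ u₀
  s2 : Seg2 Lay μ u₀
  s3 : Seg3 Lay μ u₀
  s4 : Seg4 Lay μ u₀
  s5 : Seg5 Lay μ u₀
  s6 : Seg6 Lay μ u₀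
  s7 : Seg7 Lay μ u₀
  s8 : Seg8 Lay μ u₀
  s9 : Seg9 Lay μ u₀
  err : SegERR Lay μ u₀
  c1 : SegC1 Lay μ u₀
  c2 : SegC2 Lay μ u₀
  c3 : SegC3 Lay μ u₀
  c4 : SegC4 Lay μ u₀
  c5 : SegC5 Lay μ u₀
  c6 : SegC6 Lay μ u₀
  c7 : SegC7 Lay μ u₀
  c8 : SegC8 Lay μ u₀
  c9 : SegC9 Lay μ u₀
  c10 : SegC10 Lay μ u₀
  c11 : SegC11 Lay μ u₀
  c12 : SegC12 Lay μ u₀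
  c13 : SegC13 Lay μ u₀
  c14 : SegC14 Lay μ u₀
  c15 : SegC15 Lay μ u₀
  c16 : SegC16 Lay μ u₀
  f1 : SegF1 Lay μ u₀
  f2 : SegF2 Lay μ u₀
  f3 : SegF3 Lay μ u₀
  f4 : SegF4 Lay μ u₀
  f5 : SegF5 Lay μ u₀
  f6 : SegF6 Lay μ u₀
  f7 : SegF7 Lay μ u₀
  r1 : SegR1 Lay μ u₀
  r2 : SegR2 Lay μ u₀
  r3 : SegR3 Lay μ u₀
  r4 : SegR4 Lay μ u₀
  r5 : SegR5 Lay μ u₀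
  r6 : SegR6 Lay μ u₀
  r7 : SegR7 Lay μ u₀
  r8 : SegR8 Lay μ u₀
  r9 : SegR9 Lay μ u₀
  r10 : SegR10 Lay μ u₀
  r11 : SegR11 Lay μ u₀
  r12 : SegR12 Lay μ u₀
  r13 : SegR13 Lay μ u₀
  r14 : SegR14 Lay μ u₀
  r15 : SegR15 Lay μ u₀
  r16 : SegR16 Lay μ u₀
  r17 : SegR17 Lay μ u₀
  r18 : SegR18 Lay μ u₀
  r19 : SegR19 Lay μ u₀

/-- **The goal of every tail of the start_decoder_composes_w**: from `v` the function returns (`AtRet` = `Returned` of its contract). -/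
def SdReturns_w (Lay : Layout) (μ : Microarch) (u₀ : State) (g : Ghost) (v : State) : Prop :=
  ReachVia Lay μ Vorbis.WayInv v (fun w => AtRet u₀ g w)

/-! ### The two chaining rules -/

/-- **A counting loop across segment boundaries.** `P i` is the assertion of the loop head with counter `i`; at the head the
counter is at most `N` (`bound`); one round from the head reaches the target `Q` or the head with `i + 1` (`body`). Then the
target is reached from every head. Induction on `N + 1 − i`. -/
theorem sd_countLoop_w {Lay : Layout} {μ : Microarch} {P : Nat → State → Prop} {Q : State → Prop} (N : Nat)
    (bound : ∀ i v, P i v → i ≤ N)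
    (body : ∀ i v, P i v → ReachVia Lay μ Vorbis.WayInv v (fun w => Q w ∨ P (i + 1) w)) :
    ∀ i v, P i v → ReachVia Lay μ Vorbis.WayInv v Q := by
  have main : ∀ (k i : Nat), N + 1 ≤ i + k → ∀ v, P i v → ReachVia Lay μ Vorbis.WayInv v Q := by
    intro k
    induction k with
    | zero =>
      intro i hk v hp
      have hb := bound i v hp
      omega
    | succ k ih =>
      intro i hk v hp
      refine (body i v hp).trans ?_
      intro w hw
      rcases hw with hq | hnext
      · exact ReachVia.done hq
      · exact ih (i + 1) (by omega) w hnext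
  intro i v hp
  exact main (N + 1) i (by omega) v hp

/-- **A segment with an error exit**: it reaches `A` or the epilogue; from both the target is reached. -/
theorem sd_orErr_w {Lay : Layout} {μ : Microarch} {u₀ : State} {g : Ghost} {A T : State → Prop} {v : State}
    (h : ReachVia Lay μ Vorbis.WayInv v (fun w => A w ∨ AtERR u₀ g w))
    (k : ∀ w, A w → ReachVia Lay μ Vorbis.WayInv w T)
    (kerr : ∀ w, AtERR u₀ g w → ReachVia Lay μ Vorbis.WayInv w T) : ReachVia Lay μ Vorbis.WayInv v T := by
  refine h.trans ?_
  intro w hw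
  rcases hw with ha | he
  · exact k w ha
  · exact kerr w he

/-- A tail that returns, seen as one exit of a loop body. -/
theorem SdReturns_w.exit {Lay : Layout} {μ : Microarch} {u₀ : State} {g : Ghost} {v : State} {P : State → Prop}
    (h : SdReturns_w Lay μ u₀ g v) : ReachVia Lay μ Vorbis.WayInv v (fun w => AtRet u₀ g w ∨ P w) :=
  ReachVia.mono h (fun _ hw => Or.inl hw)

/-- The back edge of a loop body: the next head, seen as the other exit. -/
theorem sd_backEdge_w {Lay : Layout} {μ : Microarch} {u₀ : State} {g : Ghost} {v : State} {P : State → Prop}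
    (h : ReachVia Lay μ Vorbis.WayInv v P) : ReachVia Lay μ Vorbis.WayInv v (fun w => AtRet u₀ g w ∨ P w) :=
  ReachVia.mono h (fun _ hw => Or.inr hw)

/-! ### The bounds of the seven loop counters (the only places where an assertion is opened) -/

/-- The codebook loop: at the head `i ≤ codebook_count ≤ 256` (`SD4.done`: `upto`, CB0 in its non-NULL form = F1). -/
theorem sd_bound_C2_w {u₀ : State} {g : Ghost} {i : Nat} {v : State} (h : AtC2 u₀ g i v) : i ≤ 256 := by
  obtain ⟨A, b⟩ := h
  have hup : (i : Int) ≤ stb_vorbis.codebook_count v.mem g.f := b.sd.done.upto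
  have hcb : CB0 (g.Blk A) v.mem g.f := b.sd.done.cb0
  have hok : CodebooksOK (g.Blk A) v.mem g.f := hcb.ok b.sd.done.nonnull
  have hle := hok.F1.2
  omega

/-- The floor loop: at the head `i ≤ floor_count ≤ 64` (FL1). -/
theorem sd_bound_F2_w {u₀ : State} {g : Ghost} {i : Nat} {v : State} (h : AtF2 u₀ g i v) : i ≤ 64 := by
  obtain ⟨A5, A, b⟩ := h
  have hb : FloorLoop u₀ g pc_F2 i A5 A v := b
  have hi := hb.i_le
  have hle := hb.floors.FL1.2
  omega

/-- The residue loop: at the head `i ≤ residue_count ≤ 64` (R1). -/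
theorem sd_bound_R2_w {u₀ : State} {g : Ghost} {i : Nat} {v : State} (h : AtR2 u₀ g i v) : i ≤ 64 := by
  obtain ⟨A6, A6c, A, b⟩ := h
  have hi := b.loop.i_le
  have hle := b.loop.res.R1.2
  omega

/-- The mapping loop: at the head `i ≤ mapping_count ≤ 64` (MP1). -/
theorem sd_bound_R8_w {u₀ : State} {g : Ghost} {i : Nat} {v : State} (h : AtR8 u₀ g i v) : i ≤ 64 := by
  obtain ⟨A7, A7c, A, b⟩ := h
  have hb : MapLoop u₀ g pc_R8 i A7 A7c A.1 A v := b
  have hi := hb.i_le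
  have hle := hb.maps.MP1.2
  omega

/-- The mode loop: at the head `i ≤ mode_count ≤ 64` (MD1). -/
theorem sd_bound_R13_w {u₀ : State} {g : Ghost} {i : Nat} {v : State} (h : AtR13 u₀ g i v) : i ≤ 64 := by
  obtain ⟨A, b⟩ := h
  have hb : ModeLoop u₀ g pc_R13 i A v := b
  have hi := hb.i_le
  have hle := hb.modes.MD1.2
  omega

/-- The channel loop: at the head `i ≤ channels ≤ 16` (HD1). -/
theorem sd_bound_R15_w {u₀ : State} {g : Ghost} {i : Nat} {v : State} (h : AtR15 u₀ g i v) : i ≤ 16 := by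
  obtain ⟨A9, A, b⟩ := h
  have hb : ChanLoop u₀ g pc_R15 i A9 A v := b
  have hi := hb.i_le
  have hle := hb.mid.header.HD1.2
  omega

/-- The estimate loop: at the head `i ≤ residue_count ≤ 64` (R1 of the complete record). -/
theorem sd_bound_R17_w {u₀ : State} {g : Ghost} {i : Nat} {v : State} (h : AtR17 u₀ g i v) : i ≤ 64 := by
  obtain ⟨A9, A10, A, b⟩ := h
  have hb : EstLoop u₀ g pc_R17 i A9 A10 A v := b
  have hi := hb.i_le
  have hle := (hb.late.own.cfg.residue (by omega)).R1.2
  omega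

/-! ### The tails, from the epilogue backwards -/

/-- From the epilogue (segment ERR). -/
theorem sd_fromERR_w {Lay : Layout} {μ : Microarch} {u₀ : State} (S : SdSegs_w Lay μ u₀) (g : Ghost) (v : State)
    (h : AtERR u₀ g v) : SdReturns_w Lay μ u₀ g v :=
  S.err g v h

/-- From `return TRUE` (segment R19, then the epilogue). -/
theorem sd_fromR19_w {Lay : Layout} {μ : Microarch} {u₀ : State} (S : SdSegs_w Lay μ u₀) (g : Ghost) (v : State)
    (h : AtR19 u₀ g v) : SdReturns_w Lay μ u₀ g v :=
  (S.r19 g v h).trans (sd_fromERR_w S g)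

/-- **The estimate loop 4189** (R17 → R18 → R17; exits: R19, the epilogue). -/
theorem sd_fromR17_w {Lay : Layout} {μ : Microarch} {u₀ : State} (S : SdSegs_w Lay μ u₀) (g : Ghost) :
    ∀ i v, AtR17 u₀ g i v → SdReturns_w Lay μ u₀ g v := by
  refine sd_countLoop_w (P := fun i v => AtR17 u₀ g i v) 64 (fun i v h => sd_bound_R17_w h) ?_
  intro i v h
  refine (S.r17 g i v h).trans ?_
  intro w hw
  rcases hw with a18 | a19 | aerr
  · exact sd_backEdge_w (S.r18 g i w a18)
  · exact (sd_fromR19_w S g w a19).exit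
  · exact (sd_fromERR_w S g w aerr).exit

/-- **The channel loop 4158** (R15 → R16 → R15; exits: R17 with `i = 0`, the epilogue). -/
theorem sd_fromR15_w {Lay : Layout} {μ : Microarch} {u₀ : State} (S : SdSegs_w Lay μ u₀) (g : Ghost) :
    ∀ i v, AtR15 u₀ g i v → SdReturns_w Lay μ u₀ g v := by
  refine sd_countLoop_w (P := fun i v => AtR15 u₀ g i v) 16 (fun i v h => sd_bound_R15_w h) ?_
  intro i v h
  refine (S.r15 g i v h).trans ?_
  intro w hw
  rcases hw with a16 | a17 | aerr
  · exact sd_orErr_w (S.r16 g i w a16) (fun w' a15 => ReachVia.done (Or.inr a15)) (fun w' e => (sd_fromERR_w S g w' e).exit)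
  · exact (sd_fromR17_w S g 0 w a17).exit
  · exact (sd_fromERR_w S g w aerr).exit

/-- **The mode loop 4143** (R13 → R14 → R13; exits: R15 with `i = 0`, the epilogue). -/
theorem sd_fromR13_w {Lay : Layout} {μ : Microarch} {u₀ : State} (S : SdSegs_w Lay μ u₀) (g : Ghost) :
    ∀ i v, AtR13 u₀ g i v → SdReturns_w Lay μ u₀ g v := by
  refine sd_countLoop_w (P := fun i v => AtR13 u₀ g i v) 64 (fun i v h => sd_bound_R13_w h) ?_
  intro i v h
  refine (S.r13 g i v h).trans ?_
  intro w hw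
  rcases hw with a14 | a15
  · exact sd_orErr_w (S.r14 g i w a14) (fun w' a13 => ReachVia.done (Or.inr a13)) (fun w' e => (sd_fromERR_w S g w' e).exit)
  · exact (sd_fromR15_w S g 0 w a15).exit

/-- **The mapping loop 4095** (R8 → R9 → [R10 →] R11 → R12 → R8; exits: R13 with `i = 0`, the epilogue). -/
theorem sd_fromR8_w {Lay : Layout} {μ : Microarch} {u₀ : State} (S : SdSegs_w Lay μ u₀) (g : Ghost) :
    ∀ i v, AtR8 u₀ g i v → SdReturns_w Lay μ u₀ g v := by
  refine sd_countLoop_w (P := fun i v => AtR8 u₀ g i v) 64 (fun i v h => sd_bound_R8_w h) ?_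
  intro i v h
  -- every error exit of the body
  have kerr : ∀ w, AtERR u₀ g w →
      ReachVia Lay μ Vorbis.WayInv w (fun w' => AtRet u₀ g w' ∨ AtR8 u₀ g (i + 1) w') :=
    fun w e => (sd_fromERR_w S g w e).exit
  -- from R12, R11, R10 of this iteration to the next head
  have k12 : ∀ w, AtR12 u₀ g i w →
      ReachVia Lay μ Vorbis.WayInv w (fun w' => AtRet u₀ g w' ∨ AtR8 u₀ g (i + 1) w') :=
    fun w a12 => sd_orErr_w (S.r12 g i w a12) (fun w' a8 => ReachVia.done (Or.inr a8)) kerr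
  have k11 : ∀ w, AtR11 u₀ g i w →
      ReachVia Lay μ Vorbis.WayInv w (fun w' => AtRet u₀ g w' ∨ AtR8 u₀ g (i + 1) w') :=
    fun w a11 => sd_orErr_w (S.r11 g i w a11) k12 kerr
  have k10 : ∀ w, AtR10 u₀ g i w →
      ReachVia Lay μ Vorbis.WayInv w (fun w' => AtRet u₀ g w' ∨ AtR8 u₀ g (i + 1) w') :=
    fun w a10 => sd_orErr_w (S.r10 g i w a10) k11 kerr
  refine (S.r8 g i v h).trans ?_
  intro w hw
  rcases hw with a9 | a13
  · refine (S.r9 g i w a9).trans ?_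
    intro w' hw'
    rcases hw' with a10 | a11 | aerr
    · exact k10 w' a10
    · exact k11 w' a11
    · exact kerr w' aerr
  · exact (sd_fromR13_w S g 0 w a13).exit

/-- **The residue loop 4043** (R2 → R3 → R4 → R5 → R6 → R7 → R2; exits: R8 with `i = 0`, the epilogue). -/
theorem sd_fromR2_w {Lay : Layout} {μ : Microarch} {u₀ : State} (S : SdSegs_w Lay μ u₀) (g : Ghost) :
    ∀ i v, AtR2 u₀ g i v → SdReturns_w Lay μ u₀ g v := by
  refine sd_countLoop_w (P := fun i v => AtR2 u₀ g i v) 64 (fun i v h => sd_bound_R2_w h) ?_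
  intro i v h
  have kerr : ∀ w, AtERR u₀ g w →
      ReachVia Lay μ Vorbis.WayInv w (fun w' => AtRet u₀ g w' ∨ AtR2 u₀ g (i + 1) w') :=
    fun w e => (sd_fromERR_w S g w e).exit
  have k7 : ∀ w, AtR7 u₀ g i w →
      ReachVia Lay μ Vorbis.WayInv w (fun w' => AtRet u₀ g w' ∨ AtR2 u₀ g (i + 1) w') :=
    fun w a7 => sd_orErr_w (S.r7 g i w a7) (fun w' a2 => ReachVia.done (Or.inr a2)) kerr
  have k6 : ∀ w, AtR6 u₀ g i w →
      ReachVia Lay μ Vorbis.WayInv w (fun w' => AtRet u₀ g w' ∨ AtR2 u₀ g (i + 1) w') :=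
    fun w a6 => sd_orErr_w (S.r6 g i w a6) k7 kerr
  have k5 : ∀ w, AtR5 u₀ g i w →
      ReachVia Lay μ Vorbis.WayInv w (fun w' => AtRet u₀ g w' ∨ AtR2 u₀ g (i + 1) w') :=
    fun w a5 => sd_orErr_w (S.r5 g i w a5) k6 kerr
  have k4 : ∀ w, AtR4 u₀ g i w →
      ReachVia Lay μ Vorbis.WayInv w (fun w' => AtRet u₀ g w' ∨ AtR2 u₀ g (i + 1) w') :=
    fun w a4 => sd_orErr_w (S.r4 g i w a4) k5 kerr
  have k3 : ∀ w, AtR3 u₀ g i w →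
      ReachVia Lay μ Vorbis.WayInv w (fun w' => AtRet u₀ g w' ∨ AtR2 u₀ g (i + 1) w') :=
    fun w a3 => sd_orErr_w (S.r3 g i w a3) k4 kerr
  refine (S.r2 g i v h).trans ?_
  intro w hw
  rcases hw with a3 | a8 | aerr
  · exact k3 w a3
  · exact (sd_fromR8_w S g 0 w a8).exit
  · exact kerr w aerr

/-- From SD.6 (segment R1, then the residue loop with `i = 0`). -/
theorem sd_fromR1_w {Lay : Layout} {μ : Microarch} {u₀ : State} (S : SdSegs_w Lay μ u₀) (g : Ghost) (v : State)
    (h : AtR1 u₀ g v) : SdReturns_w Lay μ u₀ g v :=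
  sd_orErr_w (S.r1 g v h) (sd_fromR2_w S g 0) (sd_fromERR_w S g)

/-- **The floor loop 3966** (F2 → F4 → F5 → F6 → F7 → F2; exits: R1, F3 (a floor of type 0: the epilogue), the epilogue). -/
theorem sd_fromF2_w {Lay : Layout} {μ : Microarch} {u₀ : State} (S : SdSegs_w Lay μ u₀) (g : Ghost) :
    ∀ i v, AtF2 u₀ g i v → SdReturns_w Lay μ u₀ g v := by
  refine sd_countLoop_w (P := fun i v => AtF2 u₀ g i v) 64 (fun i v h => sd_bound_F2_w h) ?_
  intro i v h
  have kerr : ∀ w, AtERR u₀ g w →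
      ReachVia Lay μ Vorbis.WayInv w (fun w' => AtRet u₀ g w' ∨ AtF2 u₀ g (i + 1) w') :=
    fun w e => (sd_fromERR_w S g w e).exit
  have k7 : ∀ w, AtF7 u₀ g i w →
      ReachVia Lay μ Vorbis.WayInv w (fun w' => AtRet u₀ g w' ∨ AtF2 u₀ g (i + 1) w') :=
    fun w a7 => sd_backEdge_w (S.f7 g i w a7)
  have k6 : ∀ w, AtF6 u₀ g i w →
      ReachVia Lay μ Vorbis.WayInv w (fun w' => AtRet u₀ g w' ∨ AtF2 u₀ g (i + 1) w') :=
    fun w a6 => sd_orErr_w (S.f6 g i w a6) k7 kerr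
  have k5 : ∀ w, AtF5 u₀ g i w →
      ReachVia Lay μ Vorbis.WayInv w (fun w' => AtRet u₀ g w' ∨ AtF2 u₀ g (i + 1) w') :=
    fun w a5 => (S.f5 g i w a5).trans k6
  have k4 : ∀ w, AtF4 u₀ g i w →
      ReachVia Lay μ Vorbis.WayInv w (fun w' => AtRet u₀ g w' ∨ AtF2 u₀ g (i + 1) w') :=
    fun w a4 => sd_orErr_w (S.f4 g i w a4) k5 kerr
  refine (S.f2 g i v h).trans ?_
  intro w hw
  rcases hw with a1 | a3 | a4 | aerr
  · exact (sd_fromR1_w S g w a1).exit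
  · exact (S.f3 g i w a3).trans kerr
  · exact k4 w a4
  · exact kerr w aerr

/-- From the hand-over S4 → S5, SD.5 (segment F1, then the floor loop with `i = 0`). -/
theorem sd_fromF1_w {Lay : Layout} {μ : Microarch} {u₀ : State} (S : SdSegs_w Lay μ u₀) (g : Ghost) (v : State)
    (h : AtF1 u₀ g v) : SdReturns_w Lay μ u₀ g v :=
  sd_orErr_w (S.f1 g v h) (sd_fromF2_w S g 0) (sd_fromERR_w S g)

/-- From the end of the codebook loop (segment C16: the time-domain transfers; then the hand-over). -/
theorem sd_fromC16_w {Lay : Layout} {μ : Microarch} {u₀ : State} (S : SdSegs_w Lay μ u₀) (g : Ghost) (v : State)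
    (h : AtC16 u₀ g v) : SdReturns_w Lay μ u₀ g v :=
  sd_orErr_w (S.c16 g v h) (sd_fromF1_w S g) (sd_fromERR_w S g)

/-- **The codebook loop 3746** (C2 → C3 | C4 → C5 → C6 → C7 → C8 → C9 → [C11 → C12 → C13 | C14 → C15 →] C10 → C2; exits: C16, the
epilogue). The `goto skip` edge C12 → C15 is no exit of `SegC12` (dead under K2). -/
theorem sd_fromC2_w {Lay : Layout} {μ : Microarch} {u₀ : State} (S : SdSegs_w Lay μ u₀) (g : Ghost) :
    ∀ i v, AtC2 u₀ g i v → SdReturns_w Lay μ u₀ g v := by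
  refine sd_countLoop_w (P := fun i v => AtC2 u₀ g i v) 256 (fun i v h => sd_bound_C2_w h) ?_
  intro i v h
  have kerr : ∀ w, AtERR u₀ g w →
      ReachVia Lay μ Vorbis.WayInv w (fun w' => AtRet u₀ g w' ∨ AtC2 u₀ g (i + 1) w') :=
    fun w e => (sd_fromERR_w S g w e).exit
  have k10 : ∀ w, AtC10 u₀ g i w →
      ReachVia Lay μ Vorbis.WayInv w (fun w' => AtRet u₀ g w' ∨ AtC2 u₀ g (i + 1) w') :=
    fun w a10 => sd_backEdge_w (S.c10 g i w a10)
  have k15 : ∀ w, AtC15 u₀ g i w →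
      ReachVia Lay μ Vorbis.WayInv w (fun w' => AtRet u₀ g w' ∨ AtC2 u₀ g (i + 1) w') :=
    fun w a15 => (S.c15 g i w a15).trans k10
  have k14 : ∀ w, AtC14 u₀ g i w →
      ReachVia Lay μ Vorbis.WayInv w (fun w' => AtRet u₀ g w' ∨ AtC2 u₀ g (i + 1) w') :=
    fun w a14 => sd_orErr_w (S.c14 g i w a14) k15 kerr
  have k13 : ∀ w, AtC13 u₀ g i w →
      ReachVia Lay μ Vorbis.WayInv w (fun w' => AtRet u₀ g w' ∨ AtC2 u₀ g (i + 1) w') :=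
    fun w a13 => sd_orErr_w (S.c13 g i w a13) k15 kerr
  have k12 : ∀ w, AtC12 u₀ g i w →
      ReachVia Lay μ Vorbis.WayInv w (fun w' => AtRet u₀ g w' ∨ AtC2 u₀ g (i + 1) w') := by
    intro w a12
    refine (S.c12 g i w a12).trans ?_
    intro w' hw'
    rcases hw' with a13 | a14 | aerr
    · exact k13 w' a13
    · exact k14 w' a14
    · exact kerr w' aerr
  have k11 : ∀ w, AtC11 u₀ g i w →
      ReachVia Lay μ Vorbis.WayInv w (fun w' => AtRet u₀ g w' ∨ AtC2 u₀ g (i + 1) w') :=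
    fun w a11 => sd_orErr_w (S.c11 g i w a11) k12 kerr
  have k9 : ∀ w, AtC9 u₀ g i w →
      ReachVia Lay μ Vorbis.WayInv w (fun w' => AtRet u₀ g w' ∨ AtC2 u₀ g (i + 1) w') := by
    intro w a9
    refine (S.c9 g i w a9).trans ?_
    intro w' hw'
    rcases hw' with a10 | a11 | aerr
    · exact k10 w' a10
    · exact k11 w' a11
    · exact kerr w' aerr
  have k8 : ∀ w, AtC8 u₀ g i w →
      ReachVia Lay μ Vorbis.WayInv w (fun w' => AtRet u₀ g w' ∨ AtC2 u₀ g (i + 1) w') :=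
    fun w a8 => sd_orErr_w (S.c8 g i w a8) k9 kerr
  have k7 : ∀ w, AtC7 u₀ g i w →
      ReachVia Lay μ Vorbis.WayInv w (fun w' => AtRet u₀ g w' ∨ AtC2 u₀ g (i + 1) w') :=
    fun w a7 => sd_orErr_w (S.c7 g i w a7) k8 kerr
  have k6 : ∀ w, AtC6 u₀ g i w →
      ReachVia Lay μ Vorbis.WayInv w (fun w' => AtRet u₀ g w' ∨ AtC2 u₀ g (i + 1) w') :=
    fun w a6 => sd_orErr_w (S.c6 g i w a6) k7 kerr
  have k5 : ∀ w, AtC5 u₀ g i w →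
      ReachVia Lay μ Vorbis.WayInv w (fun w' => AtRet u₀ g w' ∨ AtC2 u₀ g (i + 1) w') :=
    fun w a5 => sd_orErr_w (S.c5 g i w a5) k6 kerr
  have k4 : ∀ w, AtC4 u₀ g i w →
      ReachVia Lay μ Vorbis.WayInv w (fun w' => AtRet u₀ g w' ∨ AtC2 u₀ g (i + 1) w') :=
    fun w a4 => sd_orErr_w (S.c4 g i w a4) k5 kerr
  have k3 : ∀ w, AtC3 u₀ g i w →
      ReachVia Lay μ Vorbis.WayInv w (fun w' => AtRet u₀ g w' ∨ AtC2 u₀ g (i + 1) w') :=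
    fun w a3 => sd_orErr_w (S.c3 g i w a3) k5 kerr
  refine (S.c2 g i v h).trans ?_
  intro w hw
  rcases hw with a3 | a4 | a16 | aerr
  · exact k3 w a3
  · exact k4 w a4
  · exact (sd_fromC16_w S g w a16).exit
  · exact kerr w aerr

/-- **The straight part** (segments .1 … .9 and C1: the prologue, the identification header, the comment header — its three loops
are inside segments .5, .6, .7 —, the codebooks block), then the codebook loop with `i = 0`. -/
theorem sd_from1_w {Lay : Layout} {μ : Microarch} {u₀ : State} (S : SdSegs_w Lay μ u₀) (g : Ghost) (v : State)
    (h : At1 u₀ g v) : SdReturns_w Lay μ u₀ g v := by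
  have kerr := sd_fromERR_w S g
  refine (S.s1 g v h).trans ?_
  intro v2 a2
  refine sd_orErr_w (S.s2 g v2 a2) ?_ kerr
  intro v3 a3
  refine sd_orErr_w (S.s3 g v3 a3) ?_ kerr
  intro v4 a4
  refine sd_orErr_w (S.s4 g v4 a4) ?_ kerr
  intro v5 a5
  refine sd_orErr_w (S.s5 g v5 a5) ?_ kerr
  intro v6 a6
  refine sd_orErr_w (S.s6 g v6 a6) ?_ kerr
  intro v7 a7
  refine sd_orErr_w (S.s7 g v7 a7) ?_ kerr
  intro v8 a8
  refine sd_orErr_w (S.s8 g v8 a8) ?_ kerr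
  intro v9 a9
  refine sd_orErr_w (S.s9 g v9 a9) ?_ kerr
  intro vc1 ac1
  refine (S.c1 g vc1 ac1).trans ?_
  intro vc2 ac2
  exact sd_fromC2_w S g 0 vc2 ac2

/-- **THE COMPOSITION**: the 52 segment statements give the function's contract. The ghosts of the activation are
`g = ⟨len, A0, frames, u, ret⟩`; `At1` is `AtEntry` and the precondition, `AtRet` is `Returned`. -/
theorem start_decoder_composes_w {Lay : Layout} {μ : Microarch} {u₀ : State} (S : SdSegs_w Lay μ u₀) (len : Nat) (A0 : Arena × List Obj)
    (frames : List (Nat × FrameLayout)) :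
    Calls Lay μ Vorbis.WayInv (Vorbis.conv u₀) Vorbis.L.start_decoder.entry (Vorbis.Spec.start_decoder.spec len A0 frames) := by
  intro u ret he hpre
  have a1 : At1 u₀ ⟨len, A0, frames, u, ret⟩ u := ⟨rfl, he, hpre⟩
  exact sd_from1_w S ⟨len, A0, frames, u, ret⟩ u a1

end Vorbis.Spec.Worked.start_decoder_COMPOSITION

theorem Vorbis.Spec.Worked.start_decoder_COMPOSITION_ok : Vorbis.Spec.start_decoder_COMPOSITION.Statement := by
  intro Lay _hLay μ _hμ u₀ h1 h2 h3 h4 h5 h6 h7 h8 h9 hERR hC1 hC2 hC3 hC4 hC5 hC6 hC7 hC8 hC9 hC10 hC11 hC12 hC13 hC14 hC15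
    hC16 hF1 hF2 hF3 hF4 hF5 hF6 hF7 hR1 hR2 hR3 hR4 hR5 hR6 hR7 hR8 hR9 hR10 hR11 hR12 hR13 hR14 hR15 hR16 hR17 hR18 hR19
    len A0 frames
  exact Vorbis.Spec.Worked.start_decoder_COMPOSITION.start_decoder_composes_w
    ⟨h1, h2, h3, h4, h5, h6, h7, h8, h9, hERR, hC1, hC2, hC3, hC4, hC5, hC6, hC7, hC8, hC9, hC10, hC11, hC12, hC13, hC14, hC15,
      hC16, hF1, hF2, hF3, hF4, hF5, hF6, hF7, hR1, hR2, hR3, hR4, hR5, hR6, hR7, hR8, hR9, hR10, hR11, hR12, hR13, hR14, hR15,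
      hR16, hR17, hR18, hR19⟩
    len A0 frames
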